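-- pv_equiv track=rewrite | github.com/DungenRobot/advent-of-code-2023 | Day22/part1.py | count_supporting
-- ===== SOURCE A (Python) =====
-- def count_supporting(supporting: dict):
--     #create a dict of form key: rect name and value: how many blocks support it
--     counts = {}
--     for supported in supporting.values():
--         for s in supported:
--             counts[s] = counts.get(s, 0) + 1
--
--     total = 0
--     for base in supporting.keys():
--         total += 1
--         for supported in supporting[base]:
--             # if any block that the base supports is only supported by that block: it cannot be removed
--             if counts.get(supported, 0) == 1:
--                 total -= 1
--                 break
--     return total
-- ===== SOURCE B (Python) =====
-- def count_supporting(supporting: dict):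
--     # Reverse map: for each supported block s, the list of bases supporting it
--     # (one entry per occurrence, so duplicates within one base's list count twice).
--     supporters = {}
--     for base, supported in supporting.items():
--         for s in supported:
--             supporters.setdefault(s, []).append(base)
--     # A base is critical iff it is the sole supporter of some block.
--     critical = set()
--     for sups in supporters.values():
--         if len(sups) == 1:
--             critical.add(sups[0])
--     return len(supporting) - len(critical)
-- ===== Notes on version B (the rewrite author's own statement) =====
-- stated objective: alternative
-- what changed: Instead of counting supports and re-scanning each base's supported list with a decrement-and-break loop, B builds a reverse supporters map in one pass and returns len(supporting) minus the size of the set of sole supporters (heads of the length-1 supporter lists).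
import Mathlib
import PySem

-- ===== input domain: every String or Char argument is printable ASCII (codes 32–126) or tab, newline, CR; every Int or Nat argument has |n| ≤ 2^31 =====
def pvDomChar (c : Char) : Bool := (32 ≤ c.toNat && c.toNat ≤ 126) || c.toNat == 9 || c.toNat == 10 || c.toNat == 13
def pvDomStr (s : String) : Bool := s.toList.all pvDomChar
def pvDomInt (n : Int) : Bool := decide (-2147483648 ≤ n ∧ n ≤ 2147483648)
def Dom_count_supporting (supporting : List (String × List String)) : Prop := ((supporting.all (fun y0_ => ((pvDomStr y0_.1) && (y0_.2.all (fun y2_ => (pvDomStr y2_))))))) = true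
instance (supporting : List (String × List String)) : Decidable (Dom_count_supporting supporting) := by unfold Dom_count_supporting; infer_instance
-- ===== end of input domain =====

-- B replaces A's count-then-rescan-with-break by a reverse supporters map and a
-- set subtraction (alternative decomposition, same asymptotic cost).
-- The dict argument arrives as an association list; both ports view it through
-- PySem.Dict.ofList, exactly the dict the Python functions receive.

-- ===== PORT A =====
-- counts[s] = counts.get(s, 0) + 1, looped over one values-list `sup`
def pvCountsStep (c : PySem.Dict String Int) (sup : List String) : PySem.Dict String Int :=
  sup.foldl (fun c s => c.insert s (c.getD s 0 + 1)) c

-- the inner 'for supported in supporting[base]: if …: total -= 1; break' loop,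
-- returning the updated total
def pvLoopA (counts : PySem.Dict String Int) (total : Int) : List String → Int
  | [] => total
  | s :: rest => if counts.getD s 0 == 1 then total - 1 else pvLoopA counts total rest

def count_supporting (supporting : List (String × List String)) : Int :=
  let d := PySem.Dict.ofList supporting
  let counts := d.values.foldl pvCountsStep PySem.Dict.empty
  -- base ranges over d.keys, so Python's d[base] always succeeds; getD is exact here
  d.keys.foldl (fun total base => pvLoopA counts (total + 1) (d.getD base [])) 0

-- ===== PORT B =====
-- 'supporters.setdefault(s, []).append(base)' = modify s [] (· ++ [base])
def pvSupportersStep (m : PySem.Dict String (List String)) (p : String × List String) :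
    PySem.Dict String (List String) :=
  p.2.foldl (fun m s => m.modify s [] (fun l => l ++ [p.1])) m

def count_supporting_alt (supporting : List (String × List String)) : Int :=
  let d := PySem.Dict.ofList supporting
  let supporters := d.items.foldl pvSupportersStep PySem.Dict.empty
  -- sups[0] under the guard len(sups) == 1 is headD (never the default)
  let critical := supporters.values.foldl
    (fun (st : PySem.Set String) sups =>
      if sups.length == 1 then PySem.Set.add st (sups.headD "") else st)
    PySem.Set.empty
  (d.size : Int) - (critical.length : Int)

-- ===== PRECONDITION & SPEC =====
def Spec_count_supporting (supporting : List (String × List String)) (out : Int) : Prop := out = count_supporting_alt supporting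
instance (supporting : List (String × List String)) (out : Int) : Decidable (Spec_count_supporting supporting out) := by unfold Spec_count_supporting; infer_instance

-- ===== CLAIM (what is proved, stated in full; the proofs are below) =====
def Claim_equal_count_supporting : Prop := ∀ (supporting : List (String × List String)), Dom_count_supporting supporting → Spec_count_supporting supporting (count_supporting supporting)

-- ===== LEMMAS AND PROOFS =====

-- all supported-block occurrences, in order
def pvAllS (l : List (String × List String)) : List String := (l.map (·.2)).flatten

-- "base b cannot be removed": some block in b's list has total support count 1
def pvCrit (l : List (String × List String)) (d : PySem.Dict String (List String)) (b : String) : Bool :=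
  (d.getD b []).any (fun s => (pvAllS l).count s == 1)

-- A's counts dict computes the total occurrence count
theorem pvCounts_getD (vals : List (List String)) (c : PySem.Dict String Int) (v : String) :
    (vals.foldl pvCountsStep c).getD v 0 = c.getD v 0 + (vals.flatten.count v : Int) := by
  induction vals generalizing c with
  | nil => simp
  | cons sup t ih =>
    simp only [List.foldl_cons, ih, pvCountsStep, PySem.Dict.getD_foldl_insert_add_one,
      List.flatten_cons, List.count_append]
    push_cast; ring

-- the break loop is an 'any' test
theorem pvLoopA_eq (counts : PySem.Dict String Int) (t : Int) (l : List String) :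
    pvLoopA counts t l = if l.any (fun s => counts.getD s 0 == 1) then t - 1 else t := by
  induction l with
  | nil => simp [pvLoopA]
  | cons s rest ih =>
    by_cases h : counts.getD s 0 == 1 <;> simp [pvLoopA, h, ih]

-- B's inner loop appends one copy of the base per occurrence
theorem pvSuppInner_getD (sup : List String) (b v : String) (m : PySem.Dict String (List String)) :
    (sup.foldl (fun m s => m.modify s [] (fun l => l ++ [b])) m).getD v []
      = m.getD v [] ++ List.replicate (sup.count v) b := by
  induction sup generalizing m with
  | nil => simp
  | cons s t ih =>
    simp only [List.foldl_cons, ih, PySem.Dict.getD_modify, List.count_cons]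
    rcases eq_or_ne v s with h | h
    · simp [h, List.replicate_succ]
    · simp [h, (by simpa [eq_comm] using h : ¬ s = v)]

theorem pvSupporters_getD (l : List (String × List String)) (m : PySem.Dict String (List String))
    (v : String) :
    (l.foldl pvSupportersStep m).getD v []
      = m.getD v [] ++ l.flatMap (fun p => List.replicate (p.2.count v) p.1) := by
  induction l generalizing m with
  | nil => simp
  | cons p t ih =>
    simp only [List.foldl_cons, ih, pvSupportersStep, pvSuppInner_getD, List.flatMap_cons,
      List.append_assoc]

theorem pvSupporters_keys (l : List (String × List String)) (m : PySem.Dict String (List String)) :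
    (l.foldl pvSupportersStep m).keys = PySem.Set.update m.keys (l.map (·.2)).flatten := by
  induction l generalizing m with
  | nil => simp [PySem.Set.update]
  | cons p t ih =>
    simp only [List.foldl_cons, ih, pvSupportersStep, List.map_cons, List.flatten_cons]
    rw [PySem.Dict.keys_foldl_modify p.2 [] (fun _ _ v => v ++ [p.1]) m]
    simp [PySem.Set.update, List.foldl_append]

theorem pvLen_flatMap_replicate (l : List (String × List String)) (s : String) :
    (l.flatMap (fun p => List.replicate (p.2.count s) p.1)).length = (pvAllS l).count s := by
  induction l with
  | nil => simp [pvAllS]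
  | cons p t ih => simp [pvAllS, List.count_append] at ih ⊢; omega

theorem pvFlatMap_nil (l : List (String × List String)) (s : String)
    (h : (pvAllS l).count s = 0) :
    l.flatMap (fun p => List.replicate (p.2.count s) p.1) = [] := by
  have := pvLen_flatMap_replicate l s
  rw [h] at this
  exact List.length_eq_zero_iff.mp this

theorem pvG_singleton (l : List (String × List String)) (s : String) (p : String × List String)
    (hp : p ∈ l) (hs : s ∈ p.2) (h1 : (pvAllS l).count s = 1) :
    l.flatMap (fun q => List.replicate (q.2.count s) q.1) = [p.1] := by
  induction l with
  | nil => simp at hp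
  | cons q t ih =>
    have hcount : q.2.count s + (pvAllS t).count s = 1 := by
      simpa [pvAllS, List.count_append] using h1
    rcases List.mem_cons.mp hp with hp | hp
    · subst hp
      have hpos : 0 < p.2.count s := List.count_pos_iff.mpr hs
      have h2 : (pvAllS t).count s = 0 := by omega
      have h3 : p.2.count s = 1 := by omega
      simp [h3, pvFlatMap_nil t s h2]
    · have hpos : 0 < (pvAllS t).count s := by
        refine List.count_pos_iff.mpr (List.mem_flatten.mpr ⟨p.2, List.mem_map.mpr ⟨p, hp, rfl⟩, hs⟩)
      have h2 : q.2.count s = 0 := by omega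
      have h3 : (pvAllS t).count s = 1 := by omega
      simp [h2, ih hp h3]

-- membership in the critical-set fold
theorem pvMem_critical_fold (L : List (List String)) (st : PySem.Set String) (b : String) :
    b ∈ L.foldl
        (fun (st : PySem.Set String) sups =>
          if sups.length == 1 then PySem.Set.add st (sups.headD "") else st) st
      ↔ b ∈ st ∨ ∃ sups ∈ L, sups.length = 1 ∧ sups.headD "" = b := by
  induction L generalizing st with
  | nil => simp
  | cons sups t ih =>
    by_cases h : (sups.length == 1) = true
    · rw [List.foldl_cons, if_pos h, ih, PySem.Set.mem_add]
      constructor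
      · rintro ((hb | hb) | ⟨u, hu, h1, h2⟩)
        · exact Or.inl hb
        · exact Or.inr ⟨sups, List.mem_cons_self, by simpa using h, hb.symm⟩
        · exact Or.inr ⟨u, List.mem_cons_of_mem _ hu, h1, h2⟩
      · rintro (hb | ⟨u, hu, h1, h2⟩)
        · exact Or.inl (Or.inl hb)
        · rcases List.mem_cons.mp hu with rfl | hu
          · exact Or.inl (Or.inr h2.symm)
          · exact Or.inr ⟨u, hu, h1, h2⟩
    · rw [List.foldl_cons, if_neg h, ih]
      constructor
      · rintro (hb | ⟨u, hu, h1, h2⟩)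
        · exact Or.inl hb
        · exact Or.inr ⟨u, List.mem_cons_of_mem _ hu, h1, h2⟩
      · rintro (hb | ⟨u, hu, h1, h2⟩)
        · exact Or.inl hb
        · rcases List.mem_cons.mp hu with rfl | hu
          · exact absurd h1 (by simpa using h)
          · exact Or.inr ⟨u, hu, h1, h2⟩

theorem pvNodup_critical_fold (L : List (List String)) (st : PySem.Set String)
    (h : st.Nodup) :
    (L.foldl
        (fun (st : PySem.Set String) sups =>
          if sups.length == 1 then PySem.Set.add st (sups.headD "") else st) st).Nodup := by
  induction L generalizing st with
  | nil => exact h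
  | cons sups t ih =>
    by_cases hl : (sups.length == 1) = true
    · simp only [List.foldl_cons, if_pos hl]
      exact ih _ (PySem.Set.nodup_add _ _ h)
    · simp only [List.foldl_cons, if_neg hl]
      exact ih _ h

-- A counts a key unless it is critical
theorem pvA_eq (supporting : List (String × List String)) :
    count_supporting supporting
      = ((PySem.Dict.ofList supporting).keys.countP
          (fun b => !pvCrit (PySem.Dict.ofList supporting).items (PySem.Dict.ofList supporting) b) : Int) := by
  simp only [count_supporting]
  set d := PySem.Dict.ofList supporting with hd
  set counts := d.values.foldl pvCountsStep PySem.Dict.empty with hcountsdef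
  have hcounts : ∀ s, counts.getD s 0 = ((pvAllS d.items).count s : Int) := by
    intro s
    rw [hcountsdef, pvCounts_getD]
    simp only [PySem.Dict.getD_empty, pvAllS, zero_add]
    rfl
  have hstep : ∀ (t : Int) (b : String), b ∈ d.keys →
      pvLoopA counts (t + 1) (d.getD b []) = if pvCrit d.items d b then t else t + 1 := by
    intro t b _
    rw [pvLoopA_eq]
    have hany : ((d.getD b []).any fun s => counts.getD s 0 == 1)
        = ((d.getD b []).any fun s => (pvAllS d.items).count s == 1) := by
      apply PySem.List.any_congr_mem
      intro s _
      rw [hcounts s, Bool.eq_iff_iff]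
      simp [Nat.cast_eq_one]
    rw [hany]
    change (if pvCrit d.items d b then t + 1 - 1 else t + 1) = _
    split_ifs <;> ring
  have hA : d.keys.foldl (fun total base => pvLoopA counts (total + 1) (d.getD base [])) 0
      = d.keys.foldl (fun t b => if pvCrit d.items d b then t else t + 1) 0 :=
    PySem.List.foldl_congr_mem d.keys _ _ 0 hstep
  rw [hA]
  have hswap : (fun (t : Int) (b : String) => if pvCrit d.items d b then t else t + 1)
      = (fun (t : Int) b => if (!pvCrit d.items d b) then t + 1 else t) := by
    funext t b
    cases pvCrit d.items d b <;> simp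
  rw [hswap, PySem.List.foldl_if_add_one]
  simp

-- B subtracts the number of critical keys
theorem pvB_eq (supporting : List (String × List String)) :
    count_supporting_alt supporting
      = ((PySem.Dict.ofList supporting).keys.length : Int)
        - (((PySem.Dict.ofList supporting).keys.filter
            (pvCrit (PySem.Dict.ofList supporting).items (PySem.Dict.ofList supporting))).length : Int) := by
  simp only [count_supporting_alt]
  set d := PySem.Dict.ofList supporting with hd
  set supporters := d.items.foldl pvSupportersStep PySem.Dict.empty with hsupdef
  have hnd : d.keys.Nodup := PySem.Dict.nodup_keys_ofList supporting
  have hkeys : supporters.keys = PySem.Set.ofList (pvAllS d.items) := by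
    rw [hsupdef, pvSupporters_keys]
    rfl
  have hsnd : supporters.keys.Nodup := by
    rw [hkeys]; exact PySem.Set.nodup_ofList _
  have hg : ∀ v, supporters.getD v []
      = d.items.flatMap (fun p => List.replicate (p.2.count v) p.1) := by
    intro v; rw [hsupdef, pvSupporters_getD]; simp
  have hvals : supporters.values = supporters.keys.map (fun k => supporters.getD k []) :=
    PySem.Dict.values_eq_map_keys supporters hsnd []
  set critical := supporters.values.foldl
    (fun (st : PySem.Set String) sups =>
      if sups.length == 1 then PySem.Set.add st (sups.headD "") else st)
    PySem.Set.empty with hcritdef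
  have hmem : ∀ b, b ∈ critical ↔ b ∈ d.keys.filter (pvCrit d.items d) := by
    intro b
    rw [hcritdef, pvMem_critical_fold]
    constructor
    · rintro (h0 | ⟨sups, hsups, h1, h2⟩)
      · exact absurd h0 List.not_mem_nil
      · rw [hvals] at hsups
        obtain ⟨s, hsk, rfl⟩ := List.mem_map.mp hsups
        rw [hkeys, PySem.Set.mem_ofList] at hsk
        simp only [pvAllS] at hsk
        obtain ⟨sup, hsup2, hs⟩ := List.mem_flatten.mp hsk
        obtain ⟨p, hp, rfl⟩ := List.mem_map.mp hsup2
        have hcnt : (pvAllS d.items).count s = 1 := by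
          rw [hg, pvLen_flatMap_replicate] at h1
          exact h1
        have hgs := pvG_singleton d.items s p hp hs hcnt
        have hb : b = p.1 := by
          rw [hg, hgs] at h2
          simpa using h2.symm
        refine List.mem_filter.mpr ⟨?_, ?_⟩
        · exact hb ▸ (show p.1 ∈ d.items.map (·.1) from List.mem_map.mpr ⟨p, hp, rfl⟩)
        · have hpair : (b, p.2) ∈ d.items := by
            rw [hb]
            simpa using hp
          have hget : d.getD b [] = p.2 := PySem.Dict.getD_of_mem_items d hpair hnd []
          simp only [pvCrit]
          exact List.any_eq_true.mpr ⟨s, by rw [hget]; exact hs, by simp [hcnt]⟩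
    · intro hb
      obtain ⟨hbk, hcrit⟩ := List.mem_filter.mp hb
      obtain ⟨s, hsmem, hs1⟩ := List.any_eq_true.mp hcrit
      obtain ⟨p, hp, hpb⟩ := List.mem_map.mp (show b ∈ d.items.map (·.1) from hbk)
      have hpair : (b, p.2) ∈ d.items := by
        rw [← hpb]
        simpa using hp
      have hget : d.getD b [] = p.2 := PySem.Dict.getD_of_mem_items d hpair hnd []
      have hcnt : (pvAllS d.items).count s = 1 := by simpa using hs1
      rw [hget] at hsmem
      have hgs := pvG_singleton d.items s p hp hsmem hcnt
      refine Or.inr ⟨supporters.getD s [], ?_, ?_, ?_⟩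
      · rw [hvals]
        refine List.mem_map.mpr ⟨s, ?_, rfl⟩
        rw [hkeys, PySem.Set.mem_ofList]
        simp only [pvAllS]
        exact List.mem_flatten.mpr ⟨p.2, List.mem_map.mpr ⟨p, hp, rfl⟩, hsmem⟩
      · rw [hg, hgs]; rfl
      · rw [hg, hgs]
        simpa using hpb
  have hlen : critical.length = (d.keys.filter (pvCrit d.items d)).length := by
    have h1 : critical.Nodup := pvNodup_critical_fold _ _ List.nodup_nil
    have h2 : (d.keys.filter (pvCrit d.items d)).Nodup := hnd.filter _
    have hfin : critical.toFinset = (d.keys.filter (pvCrit d.items d)).toFinset := by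
      ext x
      simp only [List.mem_toFinset]
      exact hmem x
    calc critical.length = critical.toFinset.card := (List.toFinset_card_of_nodup h1).symm
      _ = _ := by rw [hfin]; exact List.toFinset_card_of_nodup h2
  have hsize : d.size = d.keys.length := by
    show d.items.length = (d.items.map (·.1)).length
    rw [List.length_map]
  rw [hlen, hsize]

-- ===== VERDICT (by name: the statement is the Claim_ definition above) =====
theorem count_supporting_spec : Claim_equal_count_supporting := by
  intro supporting _
  unfold Spec_count_supporting
  rw [pvA_eq, pvB_eq]
  set d := PySem.Dict.ofList supporting with hd
  have hsplit := List.length_eq_countP_add_countP (p := pvCrit d.items d) (l := d.keys)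
  have hnot : d.keys.countP (fun b => !pvCrit d.items d b)
      = d.keys.countP (fun a => decide ¬ pvCrit d.items d a = true) := by
    apply List.countP_congr
    intro a _
    cases pvCrit d.items d a <;> simp
  have hfil : (d.keys.filter (pvCrit d.items d)).length = d.keys.countP (pvCrit d.items d) :=
    List.countP_eq_length_filter.symm
  rw [hfil, hnot]
  omega
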